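-- pv_equiv track=rewrite | github.com/IG41/O-Problema-da-Mochila | main.py | PGulosoMenorPeso
-- ===== SOURCE A (Python) =====
-- def PGulosoMenorPeso(v, p, m, L):
--     itens_selecionados = []
--     peso_total = 0
--     valor_total = 0
--
--     itens_ordenados = sorted(range(m), key=lambda i: p[i])
--
--     for i in itens_ordenados:
--         if peso_total + p[i] <= L:
--             itens_selecionados.append(i + 1)
--             peso_total += p[i]
--             valor_total += v[i]
--
--     return valor_total, itens_selecionados
-- ===== SOURCE B (Python) =====
-- def PGulosoMenorPeso(v, p, m, L):
--     # Selection-based greedy: no sort; repeatedly pick the lightest remaining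
--     # item (leftmost on ties) and try to pack it.
--     remaining = list(range(m))
--     itens_selecionados = []
--     peso_total = 0
--     valor_total = 0
--     while remaining:
--         best = remaining[0]
--         for i in remaining[1:]:
--             if p[i] < p[best]:
--                 best = i
--         remaining = [i for i in remaining if i != best]
--         if peso_total + p[best] <= L:
--             itens_selecionados.append(best + 1)
--             peso_total += p[best]
--             valor_total += v[best]
--     return valor_total, itens_selecionados
-- ===== Notes on version B (the rewrite author's own statement) =====
-- stated objective: alternative
-- what changed: Replaces the sort of range(m) by weight with a selection loop: repeatedly scan the remaining indices for the lightest item (leftmost on ties), remove it and try to pack it, so no sorted list is ever built.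
-- outside the precondition, e.g. on PGulosoMenorPeso([], [5], 1, 0): A returns (0, []), B returns (0, [])
import Mathlib
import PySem

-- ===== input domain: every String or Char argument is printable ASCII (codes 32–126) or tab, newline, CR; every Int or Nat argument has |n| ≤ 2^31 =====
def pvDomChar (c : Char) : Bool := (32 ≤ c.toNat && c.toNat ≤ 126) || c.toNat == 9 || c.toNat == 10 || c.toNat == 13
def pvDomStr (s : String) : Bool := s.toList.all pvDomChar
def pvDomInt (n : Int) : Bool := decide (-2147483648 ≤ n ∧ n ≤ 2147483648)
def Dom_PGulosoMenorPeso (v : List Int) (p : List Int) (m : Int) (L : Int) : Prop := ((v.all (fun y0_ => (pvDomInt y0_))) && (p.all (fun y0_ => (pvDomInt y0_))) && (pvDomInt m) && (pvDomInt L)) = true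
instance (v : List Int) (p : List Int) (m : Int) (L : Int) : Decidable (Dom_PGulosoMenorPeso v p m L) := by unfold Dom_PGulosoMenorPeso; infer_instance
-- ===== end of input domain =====

-- B replaces A's sort-then-scan by a selection loop (repeatedly pick the lightest
-- remaining index, leftmost on ties, and try to pack it); no sorted list is built.

-- ===== PORT A =====
def PGulosoMenorPeso (v : List Int) (p : List Int) (m : Int) (L : Int) : Int × List Int :=
  -- itens_ordenados = sorted(range(m), key=lambda i: p[i])
  let itens_ordenados := PySem.List.sorted (PySem.List.pyRange 0 m 1) (fun i => PySem.List.pyGetD p i 0)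
  -- for i in itens_ordenados: …   (state = (itens_selecionados, peso_total, valor_total))
  let st := itens_ordenados.foldl (fun (acc : List Int × Int × Int) i =>
      if acc.2.1 + PySem.List.pyGetD p i 0 ≤ L then
        (acc.1 ++ [i + 1], acc.2.1 + PySem.List.pyGetD p i 0, acc.2.2 + PySem.List.pyGetD v i 0)
      else acc) ([], 0, 0)
  (st.2.2, st.1)

-- ===== PORT B =====
-- best = remaining[0]; for i in remaining[1:]: if p[i] < p[best]: best = i
def pvBest (p : List Int) (b : Int) (rest : List Int) : Int :=
  rest.foldl (fun b i => if PySem.List.pyGetD p i 0 < PySem.List.pyGetD p b 0 then i else b) b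

-- the two lemmas the while-loop's termination measure needs
theorem pvBest_mem (p : List Int) (b : Int) (rest : List Int) : pvBest p b rest ∈ b :: rest := by
  induction rest generalizing b with
  | nil => simp [pvBest]
  | cons a t ih =>
    have hstep : pvBest p b (a :: t) =
        pvBest p (if PySem.List.pyGetD p a 0 < PySem.List.pyGetD p b 0 then a else b) t := by
      simp [pvBest]
    rw [hstep]
    have h := ih (if PySem.List.pyGetD p a 0 < PySem.List.pyGetD p b 0 then a else b)
    rcases List.mem_cons.1 h with heq | ht
    · rw [heq]; split <;> simp
    · simp [ht]

theorem pvFilter_len_lt (l : List Int) (x : Int) (hx : x ∈ l) :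
    (l.filter (fun i => decide (i ≠ x))).length < l.length := by
  induction l with
  | nil => cases hx
  | cons a t ih =>
    by_cases hax : a = x
    · subst hax
      rw [List.filter_cons_of_neg (by simp)]
      exact Nat.lt_succ_of_le (List.length_filter_le _ t)
    · rcases List.mem_cons.1 hx with h | h
      · exact absurd h.symm hax
      · rw [List.filter_cons_of_pos (by simp [hax])]
        exact Nat.succ_lt_succ (ih h)

-- "while remaining: …"  (state = (itens_selecionados, peso_total, valor_total))
def pvLoopB (v : List Int) (p : List Int) (L : Int) :
    List Int → List Int × Int × Int → List Int × Int × Int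
  | [], st => st
  | r :: rs, st =>
      let best := pvBest p r rs
      let remaining' := (r :: rs).filter (fun i => decide (i ≠ best))
      let st' := if st.2.1 + PySem.List.pyGetD p best 0 ≤ L then
          (st.1 ++ [best + 1], st.2.1 + PySem.List.pyGetD p best 0, st.2.2 + PySem.List.pyGetD v best 0)
        else st
      pvLoopB v p L remaining' st'
termination_by l _ => l.length
decreasing_by exact pvFilter_len_lt (r :: rs) _ (pvBest_mem p r rs)

def PGulosoMenorPeso_alt (v : List Int) (p : List Int) (m : Int) (L : Int) : Int × List Int :=
  let st := pvLoopB v p L (PySem.List.pyRange 0 m 1) ([], 0, 0)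
  (st.2.2, st.1)

-- ===== PRECONDITION & SPEC =====
-- Pre_ excludes inputs where some index in range(m) is out of range for p or v, on
-- which Python can raise IndexError; it is slightly narrower than A's exact returning
-- domain (A returns when only the indices it never SELECTS are out of range for v).
def Pre_PGulosoMenorPeso (v : List Int) (p : List Int) (m : Int) (L : Int) : Prop :=
  m ≤ (p.length : Int) ∧ m ≤ (v.length : Int)
instance (v : List Int) (p : List Int) (m : Int) (L : Int) : Decidable (Pre_PGulosoMenorPeso v p m L) := by unfold Pre_PGulosoMenorPeso; infer_instance

def pvWitness_PGulosoMenorPeso : List Int × List Int × Int × Int := ([10, 7, 3], [4, 1, 2], 3, 3)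

def Spec_PGulosoMenorPeso (v : List Int) (p : List Int) (m : Int) (L : Int) (out : Int × List Int) : Prop := out = PGulosoMenorPeso_alt v p m L
instance (v : List Int) (p : List Int) (m : Int) (L : Int) (out : Int × List Int) : Decidable (Spec_PGulosoMenorPeso v p m L out) := by unfold Spec_PGulosoMenorPeso; infer_instance

-- ===== CLAIM (what is proved, stated in full; the proofs are below) =====
def Claim_equal_PGulosoMenorPeso : Prop := ∀ (v : List Int) (p : List Int) (m : Int) (L : Int), Dom_PGulosoMenorPeso v p m L → Pre_PGulosoMenorPeso v p m L → Spec_PGulosoMenorPeso v p m L (PGulosoMenorPeso v p m L)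

-- ===== LEMMAS AND PROOFS =====

-- the "stable order" relation: weight first, original index on ties
def pvR (p : List Int) (i j : Int) : Prop :=
  PySem.List.pyGetD p i 0 < PySem.List.pyGetD p j 0 ∨
  (PySem.List.pyGetD p i 0 = PySem.List.pyGetD p j 0 ∧ i < j)

-- the selected index is ≤ everything in weight, and strictly lighter than anything left of it
theorem pvBest_spec (p : List Int) (b : Int) (rest : List Int)
    (hpw : (b :: rest).Pairwise (· < ·)) :
    (∀ j ∈ b :: rest, PySem.List.pyGetD p (pvBest p b rest) 0 ≤ PySem.List.pyGetD p j 0) ∧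
    (∀ j ∈ b :: rest, j < pvBest p b rest → PySem.List.pyGetD p (pvBest p b rest) 0 < PySem.List.pyGetD p j 0) := by
  induction rest generalizing b with
  | nil =>
    constructor <;> intro j hj <;> simp only [List.mem_singleton] at hj <;> rw [hj]
    · simp [pvBest]
    · simp [pvBest]
  | cons a t ih =>
    rw [List.pairwise_cons] at hpw
    obtain ⟨hblt, hpw'⟩ := hpw
    have halt : ∀ x ∈ t, a < x := (List.pairwise_cons.1 hpw').1
    have hpwt : t.Pairwise (· < ·) := (List.pairwise_cons.1 hpw').2
    have hba : b < a := hblt a (by simp)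
    have hstep : pvBest p b (a :: t) =
        pvBest p (if PySem.List.pyGetD p a 0 < PySem.List.pyGetD p b 0 then a else b) t := by
      simp [pvBest]
    by_cases hc : PySem.List.pyGetD p a 0 < PySem.List.pyGetD p b 0
    · rw [hstep, if_pos hc]
      obtain ⟨ih1, ih2⟩ := ih a hpw'
      constructor
      · intro j hj
        rcases List.mem_cons.1 hj with heq | hj
        · rw [heq]; exact le_of_lt (lt_of_le_of_lt (ih1 a (by simp)) hc)
        · exact ih1 j hj
      · intro j hj hlt
        rcases List.mem_cons.1 hj with heq | hj
        · rw [heq]; exact lt_of_le_of_lt (ih1 a (by simp)) hc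
        · exact ih2 j hj hlt
    · rw [hstep, if_neg hc]
      have hc' : PySem.List.pyGetD p b 0 ≤ PySem.List.pyGetD p a 0 := not_lt.1 hc
      have hbt : (b :: t).Pairwise (· < ·) := List.pairwise_cons.2
        ⟨fun x hx => lt_trans hba (halt x hx), hpwt⟩
      obtain ⟨ih1, ih2⟩ := ih b hbt
      have hmem := pvBest_mem p b t
      constructor
      · intro j hj
        rcases List.mem_cons.1 hj with heq | hj
        · rw [heq]; exact ih1 b (by simp)
        · rcases List.mem_cons.1 hj with heq | hj
          · rw [heq]; exact le_trans (ih1 b (by simp)) hc'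
          · exact ih1 j (List.mem_cons.2 (Or.inr hj))
      · intro j hj hlt
        rcases List.mem_cons.1 hj with heq | hj
        · rw [heq] at hlt ⊢; exact ih2 b (by simp) hlt
        · rcases List.mem_cons.1 hj with heq | hj
          · rw [heq] at hlt ⊢
            have hbestt : pvBest p b t ∈ t := by
              rcases List.mem_cons.1 hmem with heq2 | ht
              · exfalso; rw [heq2] at hlt; exact absurd (lt_trans hba hlt) (lt_irrefl b)
              · exact ht
            have hblt2 : b < pvBest p b t := lt_trans hba (halt _ hbestt)
            exact lt_of_lt_of_le (ih2 b (by simp) hblt2) hc'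
          · exact ih2 j (List.mem_cons.2 (Or.inr hj)) hlt

theorem pvBest_R (p : List Int) (b : Int) (rest : List Int)
    (hpw : (b :: rest).Pairwise (· < ·)) :
    ∀ j ∈ b :: rest, j ≠ pvBest p b rest → pvR p (pvBest p b rest) j := by
  intro j hj hne
  obtain ⟨h1, h2⟩ := pvBest_spec p b rest hpw
  rcases lt_trichotomy j (pvBest p b rest) with h | h | h
  · exact Or.inl (h2 j hj h)
  · exact absurd h hne
  · rcases lt_or_eq_of_le (h1 j hj) with hlt | heq
    · exact Or.inl hlt
    · exact Or.inr ⟨heq, h⟩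

-- the order in which B's loop consumes the indices
def pvExtract (p : List Int) : List Int → List Int
  | [] => []
  | r :: rs =>
      pvBest p r rs :: pvExtract p ((r :: rs).filter (fun i => decide (i ≠ pvBest p r rs)))
termination_by l => l.length
decreasing_by exact pvFilter_len_lt (r :: rs) _ (pvBest_mem p r rs)

theorem pvLoopB_eq_foldl (v p : List Int) (L : Int) (rem : List Int) (st : List Int × Int × Int) :
    pvLoopB v p L rem st = (pvExtract p rem).foldl (fun (acc : List Int × Int × Int) i =>
      if acc.2.1 + PySem.List.pyGetD p i 0 ≤ L then
        (acc.1 ++ [i + 1], acc.2.1 + PySem.List.pyGetD p i 0, acc.2.2 + PySem.List.pyGetD v i 0)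
      else acc) st := by
  induction rem using pvExtract.induct p generalizing st with
  | case1 => simp [pvLoopB, pvExtract]
  | case2 r rs ih =>
    rw [pvLoopB, pvExtract]
    simp only [List.foldl_cons]
    exact ih _

theorem pvExtract_perm (p : List Int) (l : List Int) (h : l.Pairwise (· < ·)) :
    (pvExtract p l).Perm l := by
  induction l using pvExtract.induct p with
  | case1 => simp [pvExtract]
  | case2 r rs ih =>
    rw [pvExtract]
    have hmem := pvBest_mem p r rs
    have hnd : (r :: rs).Nodup := h.imp ne_of_lt
    have herase : (r :: rs).filter (fun i => decide (i ≠ pvBest p r rs)) = (r :: rs).erase (pvBest p r rs) := by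
      rw [List.Nodup.erase_eq_filter hnd]
      congr 1
      funext x
      by_cases hxb : x = pvBest p r rs <;> simp [hxb]
    have hpwf : ((r :: rs).filter (fun i => decide (i ≠ pvBest p r rs))).Pairwise (· < ·) :=
      h.filter _
    refine ((ih hpwf).cons _).trans ?_
    rw [herase]
    exact (List.perm_cons_erase hmem).symm

theorem pvExtract_pairwise (p : List Int) (l : List Int) (h : l.Pairwise (· < ·)) :
    (pvExtract p l).Pairwise (pvR p) := by
  induction l using pvExtract.induct p with
  | case1 => simp [pvExtract]
  | case2 r rs ih =>
    rw [pvExtract]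
    have hpwf : ((r :: rs).filter (fun i => decide (i ≠ pvBest p r rs))).Pairwise (· < ·) :=
      h.filter _
    refine List.pairwise_cons.2 ⟨?_, ih hpwf⟩
    intro j hj
    have hjf : j ∈ (r :: rs).filter (fun i => decide (i ≠ pvBest p r rs)) :=
      ((pvExtract_perm p _ hpwf).mem_iff).1 hj
    have hne := List.of_mem_filter hjf
    have hjmem : j ∈ r :: rs := List.mem_of_mem_filter hjf
    exact pvBest_R p r rs h j hjmem (by simpa using hne)

-- stability of A's insertion sort: on a strictly increasing input list the
-- sorted output is pairwise (weight, index)-lexicographically increasing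
theorem pvInsert_pairwise (p : List Int) (x : Int) (acc : List Int)
    (hacc : acc.Pairwise (pvR p)) (hlt : ∀ y ∈ acc, y < x) :
    (PySem.List.insertBy (fun a b => decide (PySem.List.pyGetD p a 0 < PySem.List.pyGetD p b 0)) x acc).Pairwise (pvR p) ∧
    ∀ y ∈ PySem.List.insertBy (fun a b => decide (PySem.List.pyGetD p a 0 < PySem.List.pyGetD p b 0)) x acc, y = x ∨ y ∈ acc := by
  induction acc with
  | nil => simp [PySem.List.insertBy]
  | cons y ys ih =>
    by_cases hxy : PySem.List.pyGetD p x 0 < PySem.List.pyGetD p y 0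
    · rw [PySem.List.insertBy, if_pos (by simpa using hxy)]
      refine ⟨List.pairwise_cons.2 ⟨?_, hacc⟩, ?_⟩
      · intro z hz
        rcases List.mem_cons.1 hz with heq | hz
        · rw [heq]; exact Or.inl hxy
        · rcases (List.pairwise_cons.1 hacc).1 z hz with h | ⟨h, _⟩
          · exact Or.inl (lt_trans hxy h)
          · exact Or.inl (lt_of_lt_of_le hxy (le_of_eq h))
      · intro z hz
        rcases List.mem_cons.1 hz with heq | hz
        · exact Or.inl heq
        · exact Or.inr hz
    · rw [PySem.List.insertBy, if_neg (by simpa using hxy)]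
      obtain ⟨ih1, ih2⟩ := ih (List.pairwise_cons.1 hacc).2
        (fun z hz => hlt z (List.mem_cons.2 (Or.inr hz)))
      refine ⟨List.pairwise_cons.2 ⟨?_, ih1⟩, ?_⟩
      · intro z hz
        rcases ih2 z hz with heq | hz'
        · rw [heq]
          rcases lt_or_eq_of_le (not_lt.1 hxy) with h | h
          · exact Or.inl h
          · exact Or.inr ⟨h, hlt y (by simp)⟩
        · exact (List.pairwise_cons.1 hacc).1 z hz'
      · intro z hz
        rcases List.mem_cons.1 hz with heq | hz
        · exact Or.inr (by simp [heq])
        · rcases ih2 z hz with heq | hz'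
          · exact Or.inl heq
          · exact Or.inr (by simp [hz'])

theorem pvFoldl_pairwise (p : List Int) (l acc : List Int)
    (h1 : acc.Pairwise (pvR p))
    (h2 : ∀ y ∈ acc, ∀ x ∈ l, y < x)
    (h3 : l.Pairwise (· < ·)) :
    (l.foldl (fun acc x => PySem.List.insertBy (fun a b => decide (PySem.List.pyGetD p a 0 < PySem.List.pyGetD p b 0)) x acc) acc).Pairwise (pvR p) := by
  induction l generalizing acc with
  | nil => simpa using h1
  | cons x t ih =>
    simp only [List.foldl_cons]
    obtain ⟨hins1, hins2⟩ := pvInsert_pairwise p x acc h1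
      (fun y hy => h2 y hy x (by simp))
    refine ih _ hins1 ?_ (List.pairwise_cons.1 h3).2
    intro y hy z hz
    rcases hins2 y hy with heq | hy'
    · rw [heq]; exact (List.pairwise_cons.1 h3).1 z hz
    · exact h2 y hy' z (List.mem_cons.2 (Or.inr hz))

theorem pvSorted_pairwise (p : List Int) (l : List Int) (h : l.Pairwise (· < ·)) :
    (PySem.List.sorted l (fun i => PySem.List.pyGetD p i 0) false).Pairwise (pvR p) := by
  rw [PySem.List.sorted_eq_foldl_insertBy]
  exact pvFoldl_pairwise p l [] (by simp) (by simp) h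

-- the two orders coincide: both are pvR-increasing rearrangements of l
theorem pvExtract_eq_sorted (p : List Int) (l : List Int) (h : l.Pairwise (· < ·)) :
    pvExtract p l = PySem.List.sorted l (fun i => PySem.List.pyGetD p i 0) false := by
  refine List.Perm.eq_of_pairwise ?_ (pvExtract_pairwise p l h) (pvSorted_pairwise p l h) ?_
  · intro a b _ _ hab hba
    unfold pvR at hab hba
    omega
  · exact (pvExtract_perm p l h).trans (PySem.List.sorted_perm l _ false).symm

-- ===== VERDICT (by name: the statement is the Claim_ definition above) =====
theorem PGulosoMenorPeso_spec : Claim_equal_PGulosoMenorPeso := by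
  intro v p m L _ _
  unfold Spec_PGulosoMenorPeso PGulosoMenorPeso PGulosoMenorPeso_alt
  rw [pvLoopB_eq_foldl, pvExtract_eq_sorted p _ (PySem.List.pairwise_lt_pyRange_one 0 m)]
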